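-- pv_equiv track=rewrite | github.com/2miles/tentmates | tentmates.py | split_on_tents
-- ===== SOURCE A (Python) =====
-- def split_on_tents(assignment):
--     """
--     Takes an assignment list: `[['alan', 'a'], ['bob', 'a'], ['carol', 'b'], ['dave', 'b']]`
--     Returns list of names grouped by tents: `[['alan', 'bob'], ['carol', 'dave']]`
--     """
--     # Initialize a dictionary to store names for each letter
--     letter_dict = {}
--     # Organize names by letter in the dictionary
--     for name, letter in assignment:
--         if letter not in letter_dict:
--             letter_dict[letter] = []
--         letter_dict[letter].append(name)
--     # Convert the dictionary values to a list of lists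
--     result_lists = list(letter_dict.values())
--     return result_lists
-- ===== SOURCE B (Python) =====
-- def split_on_tents(assignment):
--     # Different decomposition: compute the distinct tent letters in first-appearance
--     # order, then rescan the assignment once per letter to collect its names.
--     keys = list(dict.fromkeys(letter for _, letter in assignment))
--     return [[name for name, letter in assignment if letter == key] for key in keys]
-- ===== Notes on version B (the rewrite author's own statement) =====
-- stated objective: alternative
-- what changed: Instead of accumulating per-letter name lists in a dict during one pass, B first computes the distinct letters in first-appearance order and then builds each group by filtering the whole assignment per letter.
import Mathlib
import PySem

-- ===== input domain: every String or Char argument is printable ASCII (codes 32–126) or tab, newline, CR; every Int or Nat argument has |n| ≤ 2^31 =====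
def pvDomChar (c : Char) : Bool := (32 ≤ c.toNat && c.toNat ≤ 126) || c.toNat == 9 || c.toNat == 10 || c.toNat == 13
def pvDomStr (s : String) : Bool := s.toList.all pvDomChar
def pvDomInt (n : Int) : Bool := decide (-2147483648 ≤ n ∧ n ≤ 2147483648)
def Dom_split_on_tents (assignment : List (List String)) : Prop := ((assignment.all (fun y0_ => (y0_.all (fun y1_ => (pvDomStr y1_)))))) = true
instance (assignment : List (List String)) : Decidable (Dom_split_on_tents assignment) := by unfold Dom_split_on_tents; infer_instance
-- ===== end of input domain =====

-- B rebuilds each group by filtering the assignment per distinct letter (first-appearance order)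
-- instead of accumulating name lists in a dict in one pass; equivalent, not claimed faster.

-- ===== PORT A =====
-- helper: A's loop body ('for name, letter in assignment: …'); the '_ => d' branch is unreachable under Pre_
def splitStep (d : PySem.Dict String (List String)) (p : List String) : PySem.Dict String (List String) :=
  match p with
  | [name, letter] =>
      let d1 := if d.contains letter then d else d.insert letter ([] : List String)
      d1.modify letter [] (fun v => v ++ [name])
  | _ => d

def split_on_tents (assignment : List (List String)) : List (List String) :=
  (assignment.foldl splitStep PySem.Dict.empty).values

-- ===== PORT B =====
-- helpers: the two components of the unpacking 'name, letter = pair' ("" unreachable under Pre_)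
def fst2 (p : List String) : String := match p with | [n, _] => n | _ => ""
def snd2 (p : List String) : String := match p with | [_, l] => l | _ => ""

def split_on_tents_alt (assignment : List (List String)) : List (List String) :=
  let keys := PySem.List.dedup (assignment.map snd2)
  keys.map (fun k => (assignment.filter (fun p => snd2 p == k)).map fst2)

-- ===== PRECONDITION & SPEC =====
-- Pre_ excludes exactly the inputs on which Python's unpacking 'name, letter = pair' raises ValueError
def Pre_split_on_tents (assignment : List (List String)) : Prop :=
  ∀ p ∈ assignment, p.length = 2
instance (assignment : List (List String)) : Decidable (Pre_split_on_tents assignment) := by unfold Pre_split_on_tents; infer_instance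

def pvWitness_split_on_tents : List (List String) :=
  [["alan", "a"], ["bob", "a"], ["carol", "b"], ["dave", "b"]]

def Spec_split_on_tents (assignment : List (List String)) (out : List (List String)) : Prop := out = split_on_tents_alt assignment
instance (assignment : List (List String)) (out : List (List String)) : Decidable (Spec_split_on_tents assignment out) := by unfold Spec_split_on_tents; infer_instance

-- ===== CLAIM (what is proved, stated in full; the proofs are below) =====
def Claim_equal_split_on_tents : Prop := ∀ (assignment : List (List String)), Dom_split_on_tents assignment → Pre_split_on_tents assignment → Spec_split_on_tents assignment (split_on_tents assignment)

-- ===== LEMMAS AND PROOFS =====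

-- A's loop body on a 2-element pair is exactly 'd[letter] = d.get(letter, []) + [name]'
theorem splitStep_eq (d : PySem.Dict String (List String)) (p : List String) (h : p.length = 2) :
    splitStep d p = d.modify (snd2 p) [] (fun v => v ++ [fst2 p]) := by
  match p, h with
  | [n, l], _ =>
    simp only [splitStep, fst2, snd2]
    split_ifs with hc
    · rfl
    · have hc' : d.contains l = false := by simpa using hc
      simp only [PySem.Dict.modify, PySem.Dict.getD_insert_self,
        PySem.Dict.insert_insert_self, PySem.Dict.getD_of_not_contains d [] hc']

theorem split_on_tents_spec : Claim_equal_split_on_tents := by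
  intro assignment _ hpre
  unfold Spec_split_on_tents split_on_tents split_on_tents_alt
  have hstep : assignment.foldl splitStep PySem.Dict.empty
      = (assignment.map (fun p => (snd2 p, fst2 p))).foldl
          (fun d q => d.modify q.1 [] (fun v => v ++ [q.2])) PySem.Dict.empty := by
    rw [List.foldl_map]
    exact PySem.List.foldl_congr_mem _ _ _ _ (fun d p hp => splitStep_eq d p (hpre p hp))
  rw [hstep]
  set D := (assignment.map (fun p => (snd2 p, fst2 p))).foldl
      (fun d q => d.modify q.1 [] (fun v => v ++ [q.2])) PySem.Dict.empty with hD
  have hnodup : D.keys.Nodup := by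
    rw [hD]
    exact PySem.Dict.nodup_keys_foldl_modify_key _ Prod.fst _
      (fun d q => fun v => v ++ [q.2]) _ (by simp [PySem.Dict.keys_empty])
  have hkeys : D.keys = PySem.Set.ofList (assignment.map snd2) := by
    rw [hD, PySem.Dict.keys_foldl_modify_key _ Prod.fst _ (fun d q => fun v => v ++ [q.2])]
    simp only [PySem.Dict.keys_empty, List.map_map]
    rfl
  have hgetD : ∀ k, D.getD k [] = (assignment.filter (fun p => snd2 p == k)).map fst2 := by
    intro k
    rw [hD, PySem.Dict.getD_foldl_modify_append]
    simp [List.filter_map, List.map_map, Function.comp_def]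
  rw [PySem.Dict.values_eq_map_keys D hnodup [], hkeys]
  exact List.map_congr_left (fun k _ => hgetD k)
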